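-- pv_equiv track=rewrite | github.com/MrBrantCode/unitest_baseline | mut_generate/mist_train_taco/taco_7411/solution.py | calculate_floor_means
-- ===== SOURCE A (Python) =====
-- def calculate_floor_means(arr, queries):
--     n = len(arr)
--     q = len(queries) // 2
--
--     # Create a prefix sum array
--     prefix_sum = [0] * n
--     prefix_sum[0] = arr[0]
--     for i in range(1, n):
--         prefix_sum[i] = prefix_sum[i - 1] + arr[i]
--
--     results = []
--     for i in range(0, len(queries), 2):
--         l = queries[i]
--         r = queries[i + 1]
--
--         if l == 0:
--             sum_range = prefix_sum[r]
--         else: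
--             sum_range = prefix_sum[r] - prefix_sum[l - 1]
--
--         count = r - l + 1
--         mean_floor = sum_range // count
--         results.append(mean_floor)
--
--     return results
-- ===== SOURCE B (Python) =====
-- def calculate_floor_means(arr, queries):
--     results = []
--     for idx in range(0, len(queries), 2):
--         l, r = queries[idx], queries[idx + 1]
--         total = 0
--         for i in range(l, r + 1):
--             total += arr[i]
--         results.append(total // (r - l + 1))
--     return results
-- ===== Notes on version B (the rewrite author's own statement) =====
-- stated objective: simpler
-- what changed: Drops the prefix-sum table entirely: B walks the query list two elements at a time and computes each range sum directly by looping over arr[l..r], instead of building a cumulative array and taking O(1) differences into it.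
-- outside the precondition, e.g. on calculate_floor_means([1, 2, 3], [-2, 1]): A returns [0], B returns [2]; on calculate_floor_means([1, 2, 3], [3, 1]): A returns [3], B returns [0]
import Mathlib
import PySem

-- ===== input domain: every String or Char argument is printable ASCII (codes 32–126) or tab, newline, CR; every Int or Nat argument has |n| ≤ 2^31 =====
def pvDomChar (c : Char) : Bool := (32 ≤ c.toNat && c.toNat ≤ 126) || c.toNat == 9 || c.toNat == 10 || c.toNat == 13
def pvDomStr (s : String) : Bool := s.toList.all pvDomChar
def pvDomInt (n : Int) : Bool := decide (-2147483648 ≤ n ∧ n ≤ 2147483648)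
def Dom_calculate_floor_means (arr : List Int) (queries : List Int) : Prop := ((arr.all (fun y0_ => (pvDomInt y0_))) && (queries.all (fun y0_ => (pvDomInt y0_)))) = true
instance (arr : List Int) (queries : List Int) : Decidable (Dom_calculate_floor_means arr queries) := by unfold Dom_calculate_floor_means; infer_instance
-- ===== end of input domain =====

-- B drops A's prefix-sum table and sums each queried slice directly (objective: simpler).

-- ===== PORT A =====
def calculate_floor_means (arr : List Int) (queries : List Int) : List Int :=
  let n : Int := (arr.length : Int)
  let _q : Int := PySem.Int.floordiv (queries.length : Int) 2
  -- prefix_sum is filled left to right: cell i is appended when the loop writes it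
  let prefix_sum : List Int :=
    (PySem.List.pyRange 1 n 1).foldl
      (fun ps i => ps ++ [PySem.List.pyGetD ps (i - 1) 0 + PySem.List.pyGetD arr i 0])
      [PySem.List.pyGetD arr 0 0]
  (PySem.List.pyRange 0 (queries.length : Int) 2).foldl
    (fun results i =>
      let l := PySem.List.pyGetD queries i 0
      let r := PySem.List.pyGetD queries (i + 1) 0
      let sum_range := if l = 0 then PySem.List.pyGetD prefix_sum r 0
                       else PySem.List.pyGetD prefix_sum r 0 - PySem.List.pyGetD prefix_sum (l - 1) 0
      let count := r - l + 1
      results ++ [PySem.Int.floordiv sum_range count]) []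

-- ===== PORT B =====
def calculate_floor_means_alt (arr : List Int) (queries : List Int) : List Int :=
  (PySem.List.pyRange 0 (queries.length : Int) 2).foldl
    (fun results idx =>
      let l := PySem.List.pyGetD queries idx 0
      let r := PySem.List.pyGetD queries (idx + 1) 0
      let total := (PySem.List.pyRange l (r + 1) 1).foldl
        (fun total i => total + PySem.List.pyGetD arr i 0) 0
      results ++ [PySem.Int.floordiv total (r - l + 1)]) []

-- ===== PRECONDITION & SPEC =====
-- a query pair (l, r) is admitted when 0 ≤ l ≤ r < len(arr)
def pvPairOK (n l r : Int) : Bool :=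
  0 ≤ l && l ≤ r && r < n

def pvValidPairs (n : Int) : List Int → Bool
  | [] => true
  | _ :: [] => false
  | l :: r :: rest => pvPairOK n l r && pvValidPairs n rest

-- Pre_ excludes the empty array and odd-length queries (A raises IndexError), pairs with an
-- index far out of range or count 0 (both raise IndexError/ZeroDivisionError), and negative
-- or reversed (l > r) pairs: there each program returns a value produced by its own accidental
-- mechanism (A by negative-index wraparound into the prefix table, B by Python's per-element
-- negative indexing or an empty loop), a corner neither behaviour would be specified for.
def Pre_calculate_floor_means (arr : List Int) (queries : List Int) : Prop :=
  arr ≠ [] ∧ pvValidPairs (arr.length : Int) queries = true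
instance (arr : List Int) (queries : List Int) : Decidable (Pre_calculate_floor_means arr queries) := by
  unfold Pre_calculate_floor_means; infer_instance

def pvWitness_calculate_floor_means : List Int × List Int := ([1, 2, 3], [0, 1, 1, 2])

def Spec_calculate_floor_means (arr : List Int) (queries : List Int) (out : List Int) : Prop :=
  out = calculate_floor_means_alt arr queries
instance (arr : List Int) (queries : List Int) (out : List Int) : Decidable (Spec_calculate_floor_means arr queries out) := by
  unfold Spec_calculate_floor_means; infer_instance

-- ===== CLAIM (what is proved, stated in full; the proofs are below) =====
def Claim_equal_calculate_floor_means : Prop := ∀ (arr : List Int) (queries : List Int), Dom_calculate_floor_means arr queries → Pre_calculate_floor_means arr queries → Spec_calculate_floor_means arr queries (calculate_floor_means arr queries)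

-- ===== LEMMAS AND PROOFS =====

-- the value A's prefix loop builds: cell t holds the sum of arr[0..t]
def pvPsums (arr : List Int) : List Int :=
  (List.range arr.length).map (fun t => ((arr.take (t + 1)).sum : Int))

def pvS (arr : List Int) (k : Nat) : Int := (arr.take k).sum

lemma pv_psums_len (arr : List Int) : (pvPsums arr).length = arr.length := by
  simp [pvPsums]

lemma pv_prefix_gen (arr : List Int) (h : arr ≠ []) : ∀ (m : Nat), 1 ≤ m → m ≤ arr.length →
    (PySem.List.pyRange 1 (m : Int) 1).foldl
      (fun ps i => ps ++ [PySem.List.pyGetD ps (i - 1) 0 + PySem.List.pyGetD arr i 0])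
      [PySem.List.pyGetD arr 0 0]
    = (List.range m).map (fun t => ((arr.take (t + 1)).sum : Int)) := by
  intro m
  induction m with
  | zero => omega
  | succ m ih =>
    intro h1 h2
    by_cases hm : m = 0
    · subst hm
      rw [PySem.List.pyRange_one_eq_nil (by omega)]
      simp only [List.foldl_nil]
      obtain ⟨x, t, rfl⟩ : ∃ x t, arr = x :: t := by
        cases arr with
        | nil => exact absurd rfl h
        | cons x t => exact ⟨x, t, rfl⟩
      simp [PySem.List.pyGetD_zero_cons]
    · have hcast : ((m + 1 : Nat) : Int) = (m : Int) + 1 := by push_cast; ring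
      rw [hcast, PySem.List.pyRange_one_succ_right (by omega), List.foldl_append,
        ih (by omega) (by omega)]
      simp only [List.foldl_cons, List.foldl_nil]
      rw [List.range_succ, List.map_append, List.map_cons, List.map_nil]
      congr 1
      have h1' : ((m : Int) - 1) = ((m - 1 : Nat) : Int) := by omega
      rw [h1', PySem.List.pyGetD_natCast, PySem.List.pyGetD_natCast,
        PySem.List.getD_map_range _ _ _ _ (by omega)]
      have htake : arr.take (m + 1) = arr.take m ++ arr[m]?.toList := List.take_add_one
      have hgm : arr[m]? = some (arr.getD m 0) := by
        rw [List.getD_eq_getElem _ _ (by omega)]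
        exact List.getElem?_eq_getElem (by omega)
      rw [htake, hgm]
      simp only [Option.toList_some, List.sum_append, List.sum_cons, List.sum_nil]
      rw [show m - 1 + 1 = m by omega]
      simp

lemma pv_prefix_eq (arr : List Int) (h : arr ≠ []) :
    (PySem.List.pyRange 1 (arr.length : Int) 1).foldl
      (fun ps i => ps ++ [PySem.List.pyGetD ps (i - 1) 0 + PySem.List.pyGetD arr i 0])
      [PySem.List.pyGetD arr 0 0] = pvPsums arr :=
  pv_prefix_gen arr h arr.length (by cases arr <;> simp_all) le_rfl

-- A's per-query value, as a function of the (Int) index into queries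
def pvGA (pref queries : List Int) (i : Int) : Int :=
  let l := PySem.List.pyGetD queries i 0
  let r := PySem.List.pyGetD queries (i + 1) 0
  let sum_range := if l = 0 then PySem.List.pyGetD pref r 0
                   else PySem.List.pyGetD pref r 0 - PySem.List.pyGetD pref (l - 1) 0
  PySem.Int.floordiv sum_range (r - l + 1)

lemma pv_take_split (arr : List Int) (a b : Nat) (hab : a ≤ b) :
    ((arr.drop a).take (b - a)).sum = (arr.take b).sum - (arr.take a).sum := by
  have : arr.take b = arr.take a ++ (arr.drop a).take (b - a) := by
    rw [← List.take_add]
    congr 1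
    omega
  rw [this, List.sum_append]
  ring

-- reading the prefix table at a (possibly negative, wrapping) Python index
lemma pv_pref_get (arr : List Int) (r : Int) (h1 : -(arr.length : Int) ≤ r)
    (h2 : r < (arr.length : Int)) :
    PySem.List.pyGetD (pvPsums arr) r 0
      = pvS arr ((if 0 ≤ r then r else (arr.length : Int) + r) + 1).toNat := by
  by_cases hr : 0 ≤ r
  · rw [if_pos hr, show r = ((r.toNat : Nat) : Int) by omega, PySem.List.pyGetD_natCast]
    unfold pvPsums
    rw [PySem.List.getD_map_range _ _ _ _ (by omega)]
    unfold pvS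
    congr 1
  · rw [if_neg hr, show r = -(((-r).toNat : Nat) : Int) by omega,
      PySem.List.pyGetD_neg_natCast _ _ _ (by omega) (by rw [pv_psums_len]; omega)]
    simp only [pvPsums, List.getElem_map, List.getElem_range, List.length_map,
      List.length_range]
    unfold pvS
    rw [show ((arr.length : Int) + -((-r).toNat : Int) + 1).toNat = arr.length - (-r).toNat + 1 by omega]

-- the element loop of B over range(l, r+1) sums the subarray arr[l..r]
lemma pv_inner (arr : List Int) (l r : Int) (h0 : 0 ≤ l) (hlr : l ≤ r)
    (hr : r < (arr.length : Int)) :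
    (PySem.List.pyRange l (r + 1) 1).foldl (fun total i => total + PySem.List.pyGetD arr i 0) 0
      = ((arr.drop l.toNat).take (r.toNat + 1 - l.toNat)).sum := by
  rw [PySem.List.foldl_add, PySem.List.pyRange_one, List.map_map, zero_add]
  congr 1
  apply List.ext_getElem
  · simp only [List.length_map, List.length_range, List.length_take, List.length_drop]
    omega
  · intro i h1 h2
    simp only [List.length_map, List.length_range] at h1
    simp only [List.getElem_map, List.getElem_range, Function.comp_apply]
    rw [List.getElem_take, List.getElem_drop]
    rw [show (l + (i : Int)) = ((l.toNat + i : Nat) : Int) by omega, PySem.List.pyGetD_natCast]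
    rw [List.getD_eq_getElem _ _ (by omega)]

-- A's prefix-table expression equals B's direct sum of arr[l..r], for every admitted pair
lemma pv_pair (arr : List Int) (l r : Int) (h : pvPairOK (arr.length : Int) l r = true) :
    (if l = 0 then PySem.List.pyGetD (pvPsums arr) r 0
     else PySem.List.pyGetD (pvPsums arr) r 0 - PySem.List.pyGetD (pvPsums arr) (l - 1) 0)
      = (PySem.List.pyRange l (r + 1) 1).foldl (fun total i => total + PySem.List.pyGetD arr i 0) 0 := by
  unfold pvPairOK at h
  simp only [Bool.and_eq_true, decide_eq_true_eq] at h
  obtain ⟨⟨h0, hlr⟩, hr⟩ := h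
  have hr0 : (0 : Int) ≤ r := le_trans h0 hlr
  rw [pv_inner arr l r h0 hlr hr,
    pv_take_split arr l.toNat (r.toNat + 1) (by omega),
    pv_pref_get arr r (by omega) (by omega),
    if_pos hr0, show (r + 1).toNat = r.toNat + 1 by omega]
  by_cases hl0 : l = 0
  · subst hl0
    rw [if_pos rfl]
    unfold pvS
    simp
  · rw [if_neg hl0, pv_pref_get arr (l - 1) (by omega) (by omega)]
    have hidx : ((if 0 ≤ l - 1 then l - 1 else (arr.length : Int) + (l - 1)) + 1).toNat
        = l.toNat := by
      split_ifs <;> omega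
    rw [hidx]
    unfold pvS
    rfl

-- B's per-query value, as a function of the (Int) index into queries
def pvGB (arr queries : List Int) (idx : Int) : Int :=
  let l := PySem.List.pyGetD queries idx 0
  let r := PySem.List.pyGetD queries (idx + 1) 0
  let total := (PySem.List.pyRange l (r + 1) 1).foldl
    (fun total i => total + PySem.List.pyGetD arr i 0) 0
  PySem.Int.floordiv total (r - l + 1)

lemma pv_valid_even (n : Int) : ∀ (qs : List Int), pvValidPairs n qs = true → qs.length % 2 = 0 := by
  intro qs
  induction qs using pvValidPairs.induct with
  | case1 => intro _; rfl
  | case2 x => intro hv; simp [pvValidPairs] at hv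
  | case3 l r rest ih =>
    intro hv
    simp only [pvValidPairs, Bool.and_eq_true] at hv
    have := ih hv.2
    simp only [List.length_cons]
    omega

lemma pv_valid_get (n : Int) : ∀ (qs : List Int), pvValidPairs n qs = true →
    ∀ (k : Nat), 2 * k + 1 < qs.length →
    pvPairOK n (qs.getD (2 * k) 0) (qs.getD (2 * k + 1) 0) = true := by
  intro qs
  induction qs using pvValidPairs.induct with
  | case1 => intro _ k hk; simp at hk
  | case2 x => intro hv; simp [pvValidPairs] at hv
  | case3 l r rest ih =>
    intro hv k hk
    simp only [pvValidPairs, Bool.and_eq_true] at hv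
    obtain ⟨hp, hrest⟩ := hv
    cases k with
    | zero => simpa using hp
    | succ k =>
      rw [show 2 * (k + 1) = 2 * k + 1 + 1 by ring]
      rw [show 2 * k + 1 + 1 + 1 = 2 * k + 1 + 2 by ring] at *
      simp only [List.getD_cons_succ]
      exact ih hrest k (by simp only [List.length_cons] at hk; omega)

-- ===== VERDICT (by name: the statement is the Claim_ definition above) =====
theorem calculate_floor_means_spec : Claim_equal_calculate_floor_means := by
  intro arr queries _ hpre
  obtain ⟨hne, hvalid⟩ := hpre
  show calculate_floor_means arr queries = calculate_floor_means_alt arr queries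
  unfold calculate_floor_means calculate_floor_means_alt
  simp only []
  rw [pv_prefix_eq arr hne]
  show ((PySem.List.pyRange 0 (queries.length : Int) 2).foldl
      (fun results i => results ++ [pvGA (pvPsums arr) queries i]) [])
    = ((PySem.List.pyRange 0 (queries.length : Int) 2).foldl
      (fun results idx => results ++ [pvGB arr queries idx]) [])
  rw [PySem.List.foldl_append_singleton_eq_map, PySem.List.foldl_append_singleton_eq_map,
    List.nil_append, List.nil_append]
  have heven := pv_valid_even (arr.length : Int) queries hvalid
  apply List.map_congr_left
  intro i hi
  rw [PySem.List.mem_pyRange_iff_of_pos (by norm_num)] at hi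
  obtain ⟨hi0, hiL, hdvd⟩ := hi
  obtain ⟨k, rfl⟩ : ∃ (k : Nat), i = ((2 * k : Nat) : Int) := by
    refine ⟨i.toNat / 2, by omega⟩
  have hk1 : 2 * k + 1 < queries.length := by
    push_cast at hiL
    omega
  have hgl : PySem.List.pyGetD queries ((2 * k : Nat) : Int) 0 = queries.getD (2 * k) 0 :=
    PySem.List.pyGetD_natCast queries (2 * k) 0
  have hgr : PySem.List.pyGetD queries (((2 * k : Nat) : Int) + 1) 0
      = queries.getD (2 * k + 1) 0 := by
    rw [show (((2 * k : Nat) : Int) + 1) = ((2 * k + 1 : Nat) : Int) by push_cast; ring,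
      PySem.List.pyGetD_natCast]
  have hpair := pv_valid_get (arr.length : Int) queries hvalid k hk1
  unfold pvGA pvGB
  simp only [hgl, hgr]
  rw [pv_pair arr _ _ hpair]
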